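-- pv_equiv track=rewrite | github.com/getuser-shivam/iSuite | build_manager.py | _version_matches
-- ===== SOURCE A (Python) =====
-- from typing import Dict, List, Optional, Tuple, Any
--
-- def _version_matches(version: str, vulnerable_versions: List[str]) -> bool:
--     """Check if version matches vulnerable version ranges (simplified)"""
--     for vuln_range in vulnerable_versions:
--         if '<' in vuln_range:
--             try:
--                 max_safe = vuln_range.replace('<', '').strip()
--                 # Simplified version comparison
--                 if version < max_safe:
--                     return True
--             except:
--                 pass
--     return False
-- ===== SOURCE B (Python) =====
-- def _version_matches(version, vulnerable_versions):
--     thresholds = [r.replace('<', '').strip() for r in vulnerable_versions if '<' in r]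
--     return bool(thresholds) and version < max(thresholds)
-- ===== Notes on version B (the rewrite author's own statement) =====
-- stated objective: simpler
-- what changed: Replaces the per-element early-return loop (compare version against each stripped threshold, return on first hit) by a comprehension that collects all stripped thresholds followed by one aggregate comparison version < max(thresholds).
import Mathlib
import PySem

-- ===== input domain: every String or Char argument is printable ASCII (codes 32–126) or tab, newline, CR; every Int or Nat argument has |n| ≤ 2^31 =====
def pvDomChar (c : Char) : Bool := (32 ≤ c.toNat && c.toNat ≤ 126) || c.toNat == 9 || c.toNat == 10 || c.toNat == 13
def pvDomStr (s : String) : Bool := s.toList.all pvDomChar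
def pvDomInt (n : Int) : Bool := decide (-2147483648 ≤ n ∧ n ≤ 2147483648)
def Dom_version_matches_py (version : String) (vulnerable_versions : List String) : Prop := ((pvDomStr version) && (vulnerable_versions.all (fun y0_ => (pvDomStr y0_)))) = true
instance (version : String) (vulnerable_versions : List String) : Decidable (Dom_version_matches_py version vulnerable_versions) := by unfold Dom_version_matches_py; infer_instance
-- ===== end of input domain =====

-- B replaces A's per-element early-return comparison loop by collecting all stripped '<'-thresholds and doing one comparison against their maximum (objective: simpler; same cost).


-- ===== PORT A =====
-- loop of A: early return on the first threshold exceeding version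
def verGoA (version : String) : List String → Bool
  | [] => false
  | r :: rest =>
    if PySem.Str.isIn "<" r then
      let max_safe := PySem.Str.strip (PySem.Str.replace r "<" "")
      if version < max_safe then true else verGoA version rest
    else verGoA version rest

def version_matches_py (version : String) (vulnerable_versions : List String) : Bool :=
  verGoA version vulnerable_versions

-- ===== PORT B =====
-- B: collect all stripped thresholds, then one comparison against their maximum
def version_matches_py_alt (version : String) (vulnerable_versions : List String) : Bool :=
  let thresholds := vulnerable_versions.foldl
    (fun acc r => if PySem.Str.isIn "<" r then acc ++ [PySem.Str.strip (PySem.Str.replace r "<" "")] else acc) []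
  match PySem.List.max? thresholds (fun x => x) with
  | none => false
  | some m => decide (version < m)

-- ===== PRECONDITION & SPEC =====
def Spec_version_matches_py (version : String) (vulnerable_versions : List String) (out : Bool) : Prop := out = version_matches_py_alt version vulnerable_versions
instance (version : String) (vulnerable_versions : List String) (out : Bool) : Decidable (Spec_version_matches_py version vulnerable_versions out) := by unfold Spec_version_matches_py; infer_instance

-- ===== CLAIM (what is proved, stated in full; the proofs are below) =====
def Claim_equal_version_matches_py : Prop := ∀ (version : String) (vulnerable_versions : List String), Dom_version_matches_py version vulnerable_versions → Spec_version_matches_py version vulnerable_versions (version_matches_py version vulnerable_versions)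

-- ===== LEMMAS AND PROOFS =====

-- ===== VERDICT (by name: the statement is the Claim_ definition above) =====
theorem verGoA_cons (version r : String) (rest : List String) :
    verGoA version (r :: rest) =
      if PySem.Str.isIn "<" r then
        (if version < PySem.Str.strip (PySem.Str.replace r "<" "") then true else verGoA version rest)
      else verGoA version rest := rfl

theorem verGoA_iff (version : String) (xs : List String) :
    verGoA version xs = true ↔
      ∃ t ∈ (xs.filter (fun r => PySem.Str.isIn "<" r)).map
              (fun r => PySem.Str.strip (PySem.Str.replace r "<" "")), version < t := by
  induction xs with
  | nil => simp [verGoA]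
  | cons r rest ih =>
    rw [verGoA_cons]
    by_cases h : PySem.Str.isIn "<" r = true
    · rw [if_pos h, List.filter_cons_of_pos h, List.map_cons]
      by_cases hv : version < PySem.Str.strip (PySem.Str.replace r "<" "")
      · rw [if_pos hv]
        exact ⟨fun _ => ⟨_, List.mem_cons_self .., hv⟩, fun _ => rfl⟩
      · rw [if_neg hv, ih]
        constructor
        · rintro ⟨t, ht, hvt⟩
          exact ⟨t, List.mem_cons_of_mem _ ht, hvt⟩
        · rintro ⟨t, ht, hvt⟩
          rcases List.mem_cons.mp ht with rfl | ht'
          · exact absurd hvt hv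
          · exact ⟨t, ht', hvt⟩
    · rw [if_neg h, List.filter_cons_of_neg (by simpa using h)]
      exact ih

theorem version_matches_py_spec : Claim_equal_version_matches_py := by
  intro version vv _
  unfold Spec_version_matches_py version_matches_py version_matches_py_alt
  rw [PySem.List.foldl_append_if]
  simp only [List.nil_append]
  set ts := (vv.filter (fun r => PySem.Str.isIn "<" r)).map
      (fun r => PySem.Str.strip (PySem.Str.replace r "<" "")) with hts
  cases hm : PySem.List.max? ts (fun x => x) with
  | none =>
    have hnil : ts = [] := (PySem.List.max?_eq_none_iff ts (fun x => x)).mp hm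
    apply Bool.eq_false_iff.mpr
    intro htrue
    obtain ⟨t, ht, _⟩ := (verGoA_iff version vv).mp htrue
    rw [← hts, hnil] at ht
    exact absurd ht (List.not_mem_nil)
  | some m =>
    have hmem := PySem.List.max?_mem hm
    have hmax := PySem.List.max?_isMax hm
    show verGoA version vv = decide (version < m)
    by_cases hv : version < m
    · rw [decide_eq_true hv]
      exact (verGoA_iff version vv).mpr ⟨m, by rw [← hts]; exact hmem, hv⟩
    · rw [decide_eq_false hv]
      apply Bool.eq_false_iff.mpr
      intro htrue
      obtain ⟨t, ht, hvt⟩ := (verGoA_iff version vv).mp htrue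
      rw [← hts] at ht
      exact hv (lt_of_lt_of_le hvt (hmax t ht))
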